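-- pv_equiv track=rewrite | github.com/sakku116/django-science2masu-project | modules/convert_urls_base.py | convertUrlsBase
-- ===== SOURCE A (Python) =====
-- def convertUrlsBase(
--         url_list,
--         use_imgix_url=False,
--         use_statically_url=False,
--         without_base_url=False,
--         name_only=False,
--         use_custom_url="",
--         query_params="",
--     ):
--     ''' convert url base of url list to another url base '''
--     img_url_list = url_list
--
--     first_prefix_path_name = "static"
--
--     def useCustomBaseUrl(custom_base_url, img_url_list=img_url_list):
--         result_list = []
--
--         for img_url in img_url_list:
--             # split url by '/' char
--             img_url = img_url.split('/')
--             # find 'static' index from list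
--             first_prefix_path_name_index = img_url.index(first_prefix_path_name)
--
--             # remove default base url (if exist) by slicing the list from 'static' to end
--             img_path = img_url[first_prefix_path_name_index:]
--
--             # join list using '/' char
--             img_path = '/'.join(img_path)
--
--             # add '/' between base_url and img_path if does not exist
--             if custom_base_url[-1] != '/' and img_path[0] != '/':
--                 result = f"{custom_base_url}/{img_path}"
--             else:
--                 result = f"{custom_base_url}{img_path}"
--
--             result_list.append(result)
--
--         img_url_list = result_list
--
--         return img_url_list
--
--     if use_imgix_url == True:
--         img_url_list = useCustomBaseUrl('https://science2masu-sf-gh.imgix.net/')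
--
--     if use_statically_url == True:
--         github_user = "sakku116"
--         github_repo = "science2masu-static-files"
--         github_branch = "main"
--         img_url_list = useCustomBaseUrl(f'https://cdn.statically.io/gh/{github_user}/{github_repo}/{github_branch}/')
--
--     if use_custom_url:
--         if 'https://' not in use_custom_url:
--             # prevent img src use relative url
--             use_custom_url = f'https://{use_custom_url}'
--         img_url_list = useCustomBaseUrl(use_custom_url)
--
--     if query_params:
--         ''' add query parameters string  '''
--         result_list = []
--
--         for img_url in img_url_list:
--             if '?' not in query_params: # add '?'
--                 result = f'{img_url}?{query_params}'
--             else: # dont add '?'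
--                 result = f'{img_url}{query_params}'
--
--             result_list.append(result)
--
--         img_url_list = result_list
--
--     if without_base_url == True:
--         ''' remove base_url if exist '''
--         # img src will use relative url because the url will be started with '/'
--         result_list = []
--
--         for img_url in img_url_list:
--             img_url = img_url.split('/')
--             first_prefix_path_name_index = img_url.index(first_prefix_path_name)
--
--             img_path = img_url[first_prefix_path_name_index:]
--             img_path = '/'.join(img_path)
--
--             result_list.append(img_path)
--
--         img_url_list = result_list
--
--     if name_only == True:
--         result_list = []
--
--         for img_url in img_url_list:
--             img_url = img_url.split('/')
--             file_name = img_url[-1]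
--
--             result_list.append(file_name)
--
--         img_url_list = result_list
--
--     return img_url_list # (list)
-- ===== SOURCE B (Python) =====
-- def convertUrlsBase(
--         url_list,
--         use_imgix_url=False,
--         use_statically_url=False,
--         without_base_url=False,
--         name_only=False,
--         use_custom_url="",
--         query_params="",
--     ):
--     ''' convert url base of url list to another url base (single pass) '''
--     # Resolve the single effective base: the LAST enabled base flag wins, and
--     # every base rewrite in A reads the ORIGINAL list, so only one matters.
--     base = None
--     if use_custom_url:
--         base = use_custom_url if 'https://' in use_custom_url else 'https://' + use_custom_url
--     elif use_statically_url:
--         base = 'https://cdn.statically.io/gh/sakku116/science2masu-static-files/main/'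
--     elif use_imgix_url:
--         base = 'https://science2masu-sf-gh.imgix.net/'
--
--     qsuffix = ""
--     if query_params:
--         qsuffix = query_params if '?' in query_params else '?' + query_params
--
--     def tail_from_static(u):
--         parts = u.split('/')
--         return '/'.join(parts[parts.index('static'):])
--
--     def one(u):
--         if base is not None:
--             path = tail_from_static(u)
--             u = base + path if base.endswith('/') else base + '/' + path
--         u = u + qsuffix
--         if without_base_url:
--             u = tail_from_static(u)
--         if name_only:
--             u = u.split('/')[-1]
--         return u
--
--     return [one(u) for u in url_list]
-- ===== Notes on version B (the rewrite author's own statement) =====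
-- stated objective: simpler
-- what changed: A makes up to six separate list passes (three base-rewrite passes through a nested helper whose default argument captures the original list, then query/strip/name passes); B first resolves the single effective base and query suffix and then builds the result in one pass over url_list.
import Mathlib
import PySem

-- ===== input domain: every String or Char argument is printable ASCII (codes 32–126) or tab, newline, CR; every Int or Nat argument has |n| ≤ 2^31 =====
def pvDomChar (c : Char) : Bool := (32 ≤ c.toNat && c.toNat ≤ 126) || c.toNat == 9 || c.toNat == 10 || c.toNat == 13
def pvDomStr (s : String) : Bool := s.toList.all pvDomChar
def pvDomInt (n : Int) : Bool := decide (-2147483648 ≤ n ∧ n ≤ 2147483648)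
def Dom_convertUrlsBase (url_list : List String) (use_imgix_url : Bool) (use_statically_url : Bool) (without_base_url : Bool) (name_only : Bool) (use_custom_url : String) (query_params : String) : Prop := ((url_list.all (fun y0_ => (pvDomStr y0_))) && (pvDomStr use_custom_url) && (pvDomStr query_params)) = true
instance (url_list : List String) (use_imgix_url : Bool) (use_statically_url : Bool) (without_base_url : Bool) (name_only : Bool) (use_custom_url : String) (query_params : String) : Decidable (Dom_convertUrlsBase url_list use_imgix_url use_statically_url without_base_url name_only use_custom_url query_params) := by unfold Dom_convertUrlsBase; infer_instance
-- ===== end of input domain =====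

-- B replaces A's four separate list passes (with the default-argument capture in the nested
-- helper) by resolving the one effective base up front and making a single pass; objective: simpler.

-- ===== PORT A =====
-- A's nested helper useCustomBaseUrl captures the ORIGINAL url_list via its default argument,
-- so every call rewrites the original list; ported as a closure over url_list.
def convertUrlsBase (url_list : List String) (use_imgix_url : Bool) (use_statically_url : Bool) (without_base_url : Bool) (name_only : Bool) (use_custom_url : String) (query_params : String) : List String :=
  let useCustomBaseUrl : String → List String := fun custom_base_url =>
    url_list.foldl (fun result_list img_url =>
      let ps := (PySem.Str.split? img_url "/").getD []          -- sep "/" ≠ "", split? is always some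
      let idx := (PySem.List.index? ps "static").getD 0         -- none = ValueError, excluded by Pre_
      let img_path := PySem.Str.join "/" (PySem.List.slice ps (some (((PySem.List.index? ps "static").getD 0 : Nat) : Int)) none)
      let result :=
        if PySem.Str.pyGet? custom_base_url (-1) ≠ some '/' ∧ PySem.Str.pyGet? img_path 0 ≠ some '/'
        then custom_base_url ++ "/" ++ img_path
        else custom_base_url ++ img_path
      result_list ++ [result]) []
  let img1 := if use_imgix_url then useCustomBaseUrl "https://science2masu-sf-gh.imgix.net/" else url_list
  -- f-string of the three literal constants github_user/github_repo/github_branch, inlined: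
  let img2 := if use_statically_url then useCustomBaseUrl "https://cdn.statically.io/gh/sakku116/science2masu-static-files/main/" else img1
  let img3 := if use_custom_url ≠ "" then
      useCustomBaseUrl (if ¬ PySem.Str.isIn "https://" use_custom_url then "https://" ++ use_custom_url else use_custom_url)
    else img2
  let img4 := if query_params ≠ "" then
      img3.foldl (fun result_list img_url =>
        result_list ++ [if ¬ PySem.Str.isIn "?" query_params
          then img_url ++ "?" ++ query_params
          else img_url ++ query_params]) []
    else img3
  let img5 := if without_base_url then
      img4.foldl (fun result_list img_url =>
        let ps := (PySem.Str.split? img_url "/").getD []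
        let idx := (PySem.List.index? ps "static").getD 0       -- none = ValueError, excluded by Pre_
        result_list ++ [PySem.Str.join "/" (PySem.List.slice ps (some (((PySem.List.index? ps "static").getD 0 : Nat) : Int)) none)]) []
    else img4
  let img6 := if name_only then
      img5.foldl (fun result_list img_url =>
        -- split('/') is never [], so img_url[-1] never raises; the getD "" default is unreachable
        result_list ++ [(PySem.List.pyGet? ((PySem.Str.split? img_url "/").getD []) (-1)).getD ""]) []
    else img5
  img6

-- ===== PORT B =====
def pvTailFromStatic (u : String) : String :=
  let parts := (PySem.Str.split? u "/").getD []                 -- sep "/" ≠ "", split? is always some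
  PySem.Str.join "/" (PySem.List.slice parts (some (((PySem.List.index? parts "static").getD 0 : Nat) : Int)) none)

def pvOne (base? : Option String) (qsuffix : String) (without_base_url : Bool) (name_only : Bool) (u : String) : String :=
  let u1 := match base? with
    | some base =>
        let path := pvTailFromStatic u
        if PySem.Str.endswith base "/" then base ++ path else base ++ "/" ++ path
    | none => u
  let u2 := u1 ++ qsuffix
  let u3 := if without_base_url then pvTailFromStatic u2 else u2
  if name_only then (PySem.List.pyGet? ((PySem.Str.split? u3 "/").getD []) (-1)).getD "" else u3

def convertUrlsBase_alt (url_list : List String) (use_imgix_url : Bool) (use_statically_url : Bool) (without_base_url : Bool) (name_only : Bool) (use_custom_url : String) (query_params : String) : List String :=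
  let base? : Option String :=
    if use_custom_url ≠ "" then
      some (if PySem.Str.isIn "https://" use_custom_url then use_custom_url else "https://" ++ use_custom_url)
    else if use_statically_url then some "https://cdn.statically.io/gh/sakku116/science2masu-static-files/main/"
    else if use_imgix_url then some "https://science2masu-sf-gh.imgix.net/"
    else none
  let qsuffix : String :=
    if query_params ≠ "" then (if PySem.Str.isIn "?" query_params then query_params else "?" ++ query_params) else ""
  url_list.map (pvOne base? qsuffix without_base_url name_only)

-- the effective base url and query suffix, as B resolves them (also used to state Pre_)
def pvEffBase (use_imgix_url use_statically_url : Bool) (use_custom_url : String) : Option String :=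
  if use_custom_url ≠ "" then
    some (if PySem.Str.isIn "https://" use_custom_url then use_custom_url else "https://" ++ use_custom_url)
  else if use_statically_url then some "https://cdn.statically.io/gh/sakku116/science2masu-static-files/main/"
  else if use_imgix_url then some "https://science2masu-sf-gh.imgix.net/"
  else none

def pvQsuf (query_params : String) : String :=
  if query_params ≠ "" then (if PySem.Str.isIn "?" query_params then query_params else "?" ++ query_params) else ""

-- ===== PRECONDITION & SPEC =====
-- Pre_ excludes exactly the inputs where Python A raises: ValueError from list.index('static')
-- in a base-rewrite pass (some url has no 'static' '/'-segment) or in the without_base_url pass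
-- (no 'static' '/'-segment left in the processed url).
def Pre_convertUrlsBase (url_list : List String) (use_imgix_url : Bool) (use_statically_url : Bool) (without_base_url : Bool) (name_only : Bool) (use_custom_url : String) (query_params : String) : Prop :=
  ((use_imgix_url = true ∨ use_statically_url = true ∨ use_custom_url ≠ "") →
      ∀ u ∈ url_list, "static" ∈ (PySem.Str.split? u "/").getD []) ∧
  (without_base_url = true → (use_imgix_url = true ∨ use_statically_url = true ∨ use_custom_url ≠ "") →
      ∀ u ∈ url_list,
      "static" ∈ (PySem.Str.split? ((pvEffBase use_imgix_url use_statically_url use_custom_url).getD "") "/").getD [] ∨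
      PySem.List.index? ((PySem.Str.split? u "/").getD []) "static"
        ≠ some (((PySem.Str.split? u "/").getD []).length - 1) ∨
      "static" ∈ (PySem.Str.split? ("static" ++ pvQsuf query_params) "/").getD []) ∧
  (without_base_url = true → ¬ (use_imgix_url = true ∨ use_statically_url = true ∨ use_custom_url ≠ "") →
      ∀ u ∈ url_list,
      "static" ∈ (PySem.Str.split? (u ++ pvQsuf query_params) "/").getD [])
instance (url_list : List String) (use_imgix_url : Bool) (use_statically_url : Bool) (without_base_url : Bool) (name_only : Bool) (use_custom_url : String) (query_params : String) : Decidable (Pre_convertUrlsBase url_list use_imgix_url use_statically_url without_base_url name_only use_custom_url query_params) := by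
  unfold Pre_convertUrlsBase
  refine instDecidableAnd (dp := ?_) (dq := instDecidableAnd (dp := ?_) (dq := ?_)) <;> infer_instance

def pvWitness_convertUrlsBase : List String × Bool × Bool × Bool × Bool × String × String :=
  (["img/static/a.png"], true, false, true, false, "", "w=1")

def Spec_convertUrlsBase (url_list : List String) (use_imgix_url : Bool) (use_statically_url : Bool) (without_base_url : Bool) (name_only : Bool) (use_custom_url : String) (query_params : String) (out : List String) : Prop := out = convertUrlsBase_alt url_list use_imgix_url use_statically_url without_base_url name_only use_custom_url query_params
instance (url_list : List String) (use_imgix_url : Bool) (use_statically_url : Bool) (without_base_url : Bool) (name_only : Bool) (use_custom_url : String) (query_params : String) (out : List String) : Decidable (Spec_convertUrlsBase url_list use_imgix_url use_statically_url without_base_url name_only use_custom_url query_params out) := by unfold Spec_convertUrlsBase; infer_instance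

-- ===== CLAIM (what is proved, stated in full; the proofs are below) =====
def Claim_equal_convertUrlsBase : Prop := ∀ (url_list : List String) (use_imgix_url : Bool) (use_statically_url : Bool) (without_base_url : Bool) (name_only : Bool) (use_custom_url : String) (query_params : String), Dom_convertUrlsBase url_list use_imgix_url use_statically_url without_base_url name_only use_custom_url query_params → Pre_convertUrlsBase url_list use_imgix_url use_statically_url without_base_url name_only use_custom_url query_params → Spec_convertUrlsBase url_list use_imgix_url use_statically_url without_base_url name_only use_custom_url query_params (convertUrlsBase url_list use_imgix_url use_statically_url without_base_url name_only use_custom_url query_params)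

-- ===== LEMMAS AND PROOFS =====

-- proof-side restatements of the two ports as one map over url_list
def pvApplyB (b? : Option String) (u : String) : String :=
  match b? with
  | some b =>
      let path := pvTailFromStatic u
      if PySem.Str.pyGet? b (-1) ≠ some '/' ∧ PySem.Str.pyGet? path 0 ≠ some '/'
      then b ++ "/" ++ path else b ++ path
  | none => u

def pvApplyQ (qp x : String) : String :=
  if qp ≠ "" then (if ¬ PySem.Str.isIn "?" qp then x ++ "?" ++ qp else x ++ qp) else x

def pvApplyW (wob : Bool) (x : String) : String := if wob then pvTailFromStatic x else x

def pvApplyN (nm : Bool) (x : String) : String :=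
  if nm then (PySem.List.pyGet? ((PySem.Str.split? x "/").getD []) (-1)).getD "" else x

lemma pvIfMap {c : Prop} [Decidable c] (f : String → String) (l : List String) :
    (if c then l.map f else l) = l.map (fun u => if c then f u else u) := by
  split_ifs <;> simp

lemma pvAltMapEq (url_list : List String) (imgix stat wob nm : Bool) (custom qp : String) :
    convertUrlsBase_alt url_list imgix stat wob nm custom qp
      = url_list.map (pvOne (pvEffBase imgix stat custom) (pvQsuf qp) wob nm) := rfl

set_option maxHeartbeats 1000000 in
lemma pvAMapEq (url_list : List String) (imgix stat wob nm : Bool) (custom qp : String) :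
    convertUrlsBase url_list imgix stat wob nm custom qp
      = url_list.map (fun u => pvApplyN nm (pvApplyW wob (pvApplyQ qp (pvApplyB (pvEffBase imgix stat custom) u)))) := by
  unfold convertUrlsBase
  simp only [PySem.List.foldl_append_singleton_eq_map, List.nil_append]
  rw [pvIfMap, pvIfMap, pvIfMap]
  by_cases hc : custom ≠ "" <;> by_cases hs : stat = true <;> by_cases hi2 : imgix = true <;>
    by_cases hin : PySem.Str.isIn "https://" custom = true <;>
    (simp only [pvEffBase, pvApplyB, pvApplyQ, pvApplyW, pvApplyN, pvTailFromStatic,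
      hc, hs, hi2, hin, ne_eq, not_false_eq_true, not_true_eq_false, eq_self_iff_true,
      Bool.false_eq_true, Bool.true_eq_false, if_true, if_false, ite_true, ite_false, List.map_map]; try rfl)

lemma pvLastSlash (b : String) :
    (PySem.Str.pyGet? b (-1) = some '/') ↔ PySem.Str.endswith b "/" = true := by
  have h1 : PySem.Str.pyGet? b (-1) = b.toList.getLast? := by
    simp [PySem.List.pyGet?_neg_one]
  have h2 : PySem.Str.endswith b "/" = true ↔ ['/'] <:+ b.toList := by
    rw [PySem.Str.endswith_eq]
    exact PySem.Chars.endswith_iff _ _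
  rw [h1, h2, List.getLast?_eq_some_iff]
  constructor
  · rintro ⟨l', hl⟩; exact ⟨l', hl.symm⟩
  · rintro ⟨t, ht⟩; exact ⟨t, ht.symm⟩

lemma pvHeadTail (u : String) (h : "static" ∈ (PySem.Str.split? u "/").getD []) :
    PySem.Str.pyGet? (pvTailFromStatic u) 0 = some 's' := by
  have key : ∀ rest : List String, PySem.Str.pyGet? (PySem.Str.join "/" ("static" :: rest)) 0 = some 's' := by
    intro rest
    have hget : ∀ s : String, PySem.Str.pyGet? s 0 = s.toList[0]? := by
      intro s; simp [PySem.List.pyGet?_zero]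
    have hto : (PySem.Str.join "/" ("static" :: rest)).toList
        = PySem.Chars.join "/".toList ("static".toList :: rest.map String.toList) := by
      rw [PySem.Str.toList_join]; rfl
    cases rest with
    | nil =>
        rw [hget, hto, show (List.map String.toList ([] : List String)) = [] from rfl,
          PySem.Chars.join_singleton]
        rfl
    | cons q t =>
        rw [hget, hto, show ("static".toList :: List.map String.toList (q :: t))
            = "static".toList :: q.toList :: List.map String.toList t from rfl,
          PySem.Chars.join_cons_cons]
        rw [show "static".toList = 's'::'t'::'a'::'t'::'i'::'c'::[] from rfl]
        simp
  obtain ⟨k, hk⟩ : ∃ k, PySem.List.index? ((PySem.Str.split? u "/").getD []) "static" = some k :=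
    Option.isSome_iff_exists.mp ((PySem.List.index?_isSome_iff _ _).2 h)
  obtain ⟨hlt, hget', -⟩ := PySem.List.getElem_of_index?_eq_some hk
  rw [show pvTailFromStatic u = PySem.Str.join "/" (PySem.List.slice ((PySem.Str.split? u "/").getD [])
      (some (((PySem.List.index? ((PySem.Str.split? u "/").getD []) "static").getD 0 : Nat) : Int)) none) from rfl]
  rw [hk, Option.getD_some, PySem.List.slice_from_natCast,
    ← List.getElem_cons_drop hlt, hget']
  exact key _

lemma pvBaseEq (b u : String) (h : "static" ∈ (PySem.Str.split? u "/").getD []) :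
    pvApplyB (some b) u
      = (if PySem.Str.endswith b "/" then b ++ pvTailFromStatic u
         else b ++ "/" ++ pvTailFromStatic u) := by
  have hp : PySem.Str.pyGet? (pvTailFromStatic u) 0 ≠ some '/' := by
    rw [pvHeadTail u h]; simp
  rw [show pvApplyB (some b) u
      = (if PySem.Str.pyGet? b (-1) ≠ some '/' ∧ PySem.Str.pyGet? (pvTailFromStatic u) 0 ≠ some '/'
         then b ++ "/" ++ pvTailFromStatic u else b ++ pvTailFromStatic u) from rfl]
  by_cases he : PySem.Str.endswith b "/" = true
  · rw [if_pos he, if_neg]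
    intro hcon; exact hcon.1 ((pvLastSlash b).2 he)
  · rw [if_neg he, if_pos]
    exact ⟨fun hc => he ((pvLastSlash b).1 hc), hp⟩

lemma pvQEq (qp x : String) : pvApplyQ qp x = x ++ pvQsuf qp := by
  unfold pvApplyQ pvQsuf
  by_cases hq : qp ≠ ""
  · by_cases hi : PySem.Chars.isIn ['?'] qp.toList = true <;>
      simp [hq, hi, String.append_assoc]
  · simp [hq, String.append_empty]

lemma pvOneEq (b? : Option String) (qp : String) (wob nm : Bool) (u : String)
    (h : b?.isSome = true → "static" ∈ (PySem.Str.split? u "/").getD []) :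
    pvApplyN nm (pvApplyW wob (pvApplyQ qp (pvApplyB b? u))) = pvOne b? (pvQsuf qp) wob nm u := by
  cases b? with
  | none =>
      show pvApplyN nm (pvApplyW wob (pvApplyQ qp u)) = pvOne none (pvQsuf qp) wob nm u
      rw [pvQEq]
      rfl
  | some b =>
      rw [pvBaseEq b u (h rfl), pvQEq]
      rfl

lemma pvEffBaseOn (imgix stat : Bool) (custom : String) :
    (pvEffBase imgix stat custom).isSome = true →
      (imgix = true ∨ stat = true ∨ custom ≠ "") := by
  unfold pvEffBase
  split_ifs <;> simp_all

-- ===== VERDICT (by name: the statement is the Claim_ definition above) =====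
theorem convertUrlsBase_spec : Claim_equal_convertUrlsBase := by
  intro url_list imgix stat wob nm custom qp _hDom hPre
  unfold Spec_convertUrlsBase
  rw [pvAMapEq, pvAltMapEq]
  apply List.map_congr_left
  intro u hu
  apply pvOneEq
  intro hb
  simp only [Pre_convertUrlsBase] at hPre
  exact hPre.1 (pvEffBaseOn imgix stat custom hb) u hu
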